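-- pv_equiv track=rewrite | github.com/ElchaabiMohamed/InferCode_SVM | NC-5690-python-files/program_2284.py | indiceOccurrence
-- ===== SOURCE A (Python) =====
-- def indiceOccurrence(n,x,l):
--   cpt=0
--   i=0
--   res=None
--   while i<len(l) and cpt<n:
--     if l[i]==x:
--       cpt=cpt+1
--     i=i+1
--   if cpt==n:
--     res=i
--   return res
-- ===== SOURCE B (Python) =====
-- def indiceOccurrence(n, x, l):
--     if n == 0:
--         return 0
--     positions = [i for i, v in enumerate(l) if v == x]
--     if n < 0 or n > len(positions):
--         return None
--     return positions[n - 1] + 1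
-- ===== Notes on version B (the rewrite author's own statement) =====
-- stated objective: alternative
-- what changed: Replaces the counting while-loop with early exit by building the full table of occurrence indices once (enumerate + filter) and then answering by a direct indexed lookup positions[n-1]+1, with the n==0 / n<0 / n too large cases handled up front.
import Mathlib
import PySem

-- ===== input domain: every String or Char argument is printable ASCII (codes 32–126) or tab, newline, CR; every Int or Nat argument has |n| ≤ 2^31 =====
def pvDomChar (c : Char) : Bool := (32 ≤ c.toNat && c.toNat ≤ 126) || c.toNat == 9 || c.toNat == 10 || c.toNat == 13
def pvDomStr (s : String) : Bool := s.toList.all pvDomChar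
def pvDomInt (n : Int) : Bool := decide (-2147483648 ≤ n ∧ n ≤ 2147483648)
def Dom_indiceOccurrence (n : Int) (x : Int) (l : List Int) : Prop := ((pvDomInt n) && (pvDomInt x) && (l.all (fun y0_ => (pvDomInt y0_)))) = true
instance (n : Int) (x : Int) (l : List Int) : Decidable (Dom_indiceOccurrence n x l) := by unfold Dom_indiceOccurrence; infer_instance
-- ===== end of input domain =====

-- B replaces A's early-exit counting while-loop by building the table of all occurrence
-- indices once and answering with a direct lookup (objective: alternative decomposition).

-- ===== PORT A =====
-- the while loop: state (i, cpt); runs while i < len(l) (list nonempty) and cpt < n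
def pvLoopA (n x : Int) : List Int → Int → Int → Int × Int
  | [], i, cpt => (i, cpt)
  | v :: rest, i, cpt =>
      if cpt < n then pvLoopA n x rest (i + 1) (if v = x then cpt + 1 else cpt)
      else (i, cpt)

def indiceOccurrence (n : Int) (x : Int) (l : List Int) : Option Int :=
  let p := pvLoopA n x l 0 0
  if p.2 = n then some p.1 else none

-- ===== PORT B =====
def indiceOccurrence_alt (n : Int) (x : Int) (l : List Int) : Option Int :=
  if n = 0 then some 0
  else
    let positions := ((PySem.List.enumerate l 0).filter (fun p => p.2 == x)).map (fun p => p.1)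
    if n < 0 ∨ n > (positions.length : Int) then none
    else
      match PySem.List.pyGet? positions (n - 1) with
      | some p => some (p + 1)
      | none => none

-- ===== PRECONDITION & SPEC =====
def Spec_indiceOccurrence (n : Int) (x : Int) (l : List Int) (out : Option Int) : Prop := out = indiceOccurrence_alt n x l
instance (n : Int) (x : Int) (l : List Int) (out : Option Int) : Decidable (Spec_indiceOccurrence n x l out) := by unfold Spec_indiceOccurrence; infer_instance

-- ===== CLAIM (what is proved, stated in full; the proofs are below) =====
def Claim_equal_indiceOccurrence : Prop := ∀ (n : Int) (x : Int) (l : List Int), Dom_indiceOccurrence n x l → Spec_indiceOccurrence n x l (indiceOccurrence n x l)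

-- ===== LEMMAS AND PROOFS =====

-- common specification both ports are reduced to (for 0 < n)
def pvGo (x : Int) : Int → List Int → Int → Option Int
  | _, [], _ => none
  | n, v :: rest, i =>
      if v = x then (if n = 1 then some (i + 1) else pvGo x (n - 1) rest (i + 1))
      else pvGo x n rest (i + 1)

theorem pvLoopA_stop (n x : Int) (l : List Int) (i cpt : Int) (h : ¬ cpt < n) :
    pvLoopA n x l i cpt = (i, cpt) := by
  cases l <;> simp [pvLoopA, h]

theorem pvLoopA_go (n x : Int) (l : List Int) :
    ∀ (i cpt : Int), cpt < n →
      (if (pvLoopA n x l i cpt).2 = n then some (pvLoopA n x l i cpt).1 else none)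
        = pvGo x (n - cpt) l i := by
  induction l with
  | nil =>
      intro i cpt h
      simp [pvLoopA, pvGo]
      omega
  | cons v rest ih =>
      intro i cpt h
      by_cases hv : v = x
      · by_cases hn : cpt + 1 = n
        · simp only [pvLoopA, if_pos h, if_pos hv]
          rw [pvLoopA_stop n x rest (i + 1) (cpt + 1) (by omega)]
          simp only [pvGo, if_pos hv]
          rw [if_pos (show ((i + 1 : Int), cpt + 1).2 = n from hn),
            if_pos (by omega : n - cpt = 1)]
        · have h1 : cpt + 1 < n := by omega
          have hih := ih (i + 1) (cpt + 1) h1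
          simp only [pvLoopA, if_pos h, if_pos hv]
          rw [hih, show n - (cpt + 1) = n - cpt - 1 by omega]
          simp only [pvGo, if_pos hv]
          rw [if_neg (by omega : ¬ n - cpt = 1)]
      · have hih := ih (i + 1) cpt h
        simp only [pvLoopA, if_pos h, if_neg hv]
        rw [hih]
        simp only [pvGo, if_neg hv]

theorem pvAlt_go (x : Int) (l : List Int) :
    ∀ (n k : Int), 0 < n →
      (let P := ((PySem.List.enumerate l k).filter (fun p => p.2 == x)).map (fun p => p.1)
       if n > (P.length : Int) then none
       else
         match PySem.List.pyGet? P (n - 1) with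
         | some p => some (p + 1)
         | none => none)
        = pvGo x n l k := by
  induction l with
  | nil =>
      intro n k hn
      simp only [PySem.List.enumerate_nil, List.filter_nil, List.map_nil, List.length_nil,
        Int.natCast_zero, pvGo]
      rw [if_pos (by omega)]
  | cons v rest ih =>
      intro n k hn
      rw [PySem.List.enumerate_cons]
      by_cases hv : v = x
      · rw [List.filter_cons_of_pos (by simpa using hv), List.map_cons]
        simp only
        set P' := ((PySem.List.enumerate rest (k + 1)).filter (fun p => p.2 == x)).map (fun p => p.1) with hP'
        simp only [pvGo, if_pos hv]
        by_cases h1 : n = 1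
        · subst h1
          rw [if_neg (by push_cast [List.length_cons]; omega)]
          norm_num [PySem.List.pyGet?_zero_cons]
        · have hn1 : 0 < n - 1 := by omega
          have hih := ih (n - 1) (k + 1) hn1
          simp only at hih
          rw [← hP'] at hih
          rw [if_neg h1, ← hih]
          by_cases hc : n - 1 > (P'.length : Int)
          · rw [if_pos (by push_cast [List.length_cons]; omega : n > ((k :: P').length : Int)),
              if_pos hc]
          · have hget : PySem.List.pyGet? (k :: P') (n - 1) = PySem.List.pyGet? P' (n - 1 - 1) := by
              rw [PySem.List.pyGet?_of_nonneg _ (by omega), PySem.List.pyGet?_of_nonneg _ (by omega)]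
              rw [show (n - 1).toNat = (n - 1 - 1).toNat + 1 by omega]
              simp
            rw [if_neg (by push_cast [List.length_cons]; omega : ¬ n > ((k :: P').length : Int)),
              if_neg hc, hget]
      · rw [List.filter_cons_of_neg (by simpa using hv)]
        simp only [pvGo, if_neg hv]
        exact ih n (k + 1) hn

-- ===== VERDICT (by name: the statement is the Claim_ definition above) =====
theorem indiceOccurrence_spec : Claim_equal_indiceOccurrence := by
  intro n x l _
  unfold Spec_indiceOccurrence indiceOccurrence indiceOccurrence_alt
  by_cases h0 : n = 0
  · subst h0
    rw [pvLoopA_stop 0 x l 0 0 (by omega)]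
    simp
  · by_cases hneg : n < 0
    · rw [pvLoopA_stop n x l 0 0 (by omega), if_neg h0, if_pos (Or.inl hneg)]
      simp
      omega
    · have hn : 0 < n := by omega
      have hA := pvLoopA_go n x l 0 0 hn
      have hB := pvAlt_go x l n 0 hn
      simp only [sub_zero] at hA
      simp only [if_neg h0]
      rw [hA, ← hB]
      simp only [hneg, false_or]
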